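-- pv_equiv track=rewrite | github.com/pmjoniak/popy | c7/p1.py | ukldalne
-- ===== SOURCE A (Python) =====
-- def litery(wyraz):
-- 	wynik = {}
-- 	for c in wyraz:
-- 		if c not in wynik:
-- 			wynik[c] = 1
-- 		else:
-- 			wynik[c] += 1
-- 	return wynik
--
-- def ukldalne(w1, w2):
-- 	l1 = litery(w1)
-- 	l2 = litery(w2)
-- 	for e in l1:
-- 		if e not in l2:
-- 			return False
-- 		if l1[e] > l2[e]:
-- 			return False
-- 	return True
-- ===== SOURCE B (Python) =====
-- def ukldalne(w1, w2):
-- 	avail = {}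
-- 	for c in w2:
-- 		avail[c] = avail.get(c, 0) + 1
-- 	for c in w1:
-- 		n = avail.get(c, 0)
-- 		if n == 0:
-- 			return False
-- 		avail[c] = n - 1
-- 	return True
-- ===== Notes on version B (the rewrite author's own statement) =====
-- stated objective: alternative
-- what changed: Instead of building two frequency tables and comparing them key by key in a second loop, B builds one table of w2's letter counts and consumes it while scanning w1, failing as soon as a letter is absent or exhausted.
import Mathlib
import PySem

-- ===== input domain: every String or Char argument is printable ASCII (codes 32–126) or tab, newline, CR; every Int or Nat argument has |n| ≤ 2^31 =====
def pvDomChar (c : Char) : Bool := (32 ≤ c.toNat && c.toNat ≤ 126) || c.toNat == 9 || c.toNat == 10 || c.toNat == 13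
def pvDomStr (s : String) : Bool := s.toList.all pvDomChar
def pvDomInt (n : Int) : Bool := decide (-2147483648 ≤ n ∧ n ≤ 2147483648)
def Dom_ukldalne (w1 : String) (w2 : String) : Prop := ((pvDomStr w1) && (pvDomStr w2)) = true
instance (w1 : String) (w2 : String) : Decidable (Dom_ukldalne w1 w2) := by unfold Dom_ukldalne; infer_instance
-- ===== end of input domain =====

-- B replaces A's two frequency tables compared in a second loop by a single table of w2's counts consumed while scanning w1 (alternative decomposition, same cost).


-- ===== PORT A =====
-- litery(wyraz): build the letter-count dict by the original if/else branches
def litery (wyraz : List Char) : PySem.Dict Char Int :=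
  wyraz.foldl
    (fun wynik c =>
      if wynik.contains c = false then wynik.insert c 1
      else wynik.insert c (wynik.getD c 0 + 1))
    PySem.Dict.empty

-- the 'for e in l1: …' loop with its two early returns
def ukldalneLoopA (l1 l2 : PySem.Dict Char Int) : List Char → Bool
  | [] => true
  | e :: rest =>
    if l2.contains e = false then false
    else if l1.getD e 0 > l2.getD e 0 then false
    else ukldalneLoopA l1 l2 rest

def ukldalne (w1 : String) (w2 : String) : Bool :=
  let l1 := litery w1.toList
  let l2 := litery w2.toList
  ukldalneLoopA l1 l2 l1.keys

-- ===== PORT B =====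
-- the 'for c in w1' loop consuming the table of available letters
def ukldalneConsume (avail : PySem.Dict Char Int) : List Char → Bool
  | [] => true
  | c :: rest =>
    let n := avail.getD c 0
    if n == 0 then false
    else ukldalneConsume (avail.insert c (n - 1)) rest

def ukldalne_alt (w1 : String) (w2 : String) : Bool :=
  let avail := w2.toList.foldl (fun d c => d.insert c (d.getD c 0 + 1)) PySem.Dict.empty
  ukldalneConsume avail w1.toList

-- ===== PRECONDITION & SPEC =====
def Spec_ukldalne (w1 : String) (w2 : String) (out : Bool) : Prop := out = ukldalne_alt w1 w2
instance (w1 : String) (w2 : String) (out : Bool) : Decidable (Spec_ukldalne w1 w2 out) := by unfold Spec_ukldalne; infer_instance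

-- ===== CLAIM (what is proved, stated in full; the proofs are below) =====
def Claim_equal_ukldalne : Prop := ∀ (w1 : String) (w2 : String), Dom_ukldalne w1 w2 → Spec_ukldalne w1 w2 (ukldalne w1 w2)

-- ===== LEMMAS AND PROOFS =====

-- A's branchy counting loop is collections.Counter
lemma litery_eq_counter (cs : List Char) : litery cs = PySem.Dict.counter cs := by
  have h : litery cs = cs.foldl (fun d x => d.insert x (d.getD x 0 + 1)) PySem.Dict.empty := by
    unfold litery
    congr 1
    funext d c
    by_cases h : d.contains c
    · simp [h]
    · have hc : d.contains c = false := by simpa using h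
      rw [if_pos hc, PySem.Dict.getD_of_not_contains d 0 hc]
      norm_num
  rw [h, PySem.Dict.foldl_insert_getD_add_one_eq_counter]

lemma loopA_eq_all (l1 l2 : PySem.Dict Char Int) (ks : List Char) :
    ukldalneLoopA l1 l2 ks
      = ks.all (fun e => l2.contains e && decide (l1.getD e 0 ≤ l2.getD e 0)) := by
  induction ks with
  | nil => rfl
  | cons e rest ih =>
    simp only [ukldalneLoopA, List.all_cons]
    by_cases h : l2.contains e = false
    · simp [h]
    · simp only [h]
      rw [Bool.not_eq_false] at h
      by_cases h2 : l1.getD e 0 > l2.getD e 0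
      · simp [h2, not_le.mpr h2]
      · simp [h2, not_lt.mp h2, ih]

set_option maxRecDepth 4096 in
lemma consume_eq (cs : List Char) : ∀ (d : PySem.Dict Char Int), (∀ c, 0 ≤ d.getD c 0) →
    ukldalneConsume d cs = decide (∀ c ∈ cs, (cs.count c : Int) ≤ d.getD c 0) := by
  induction cs with
  | nil => intro d _; simp [ukldalneConsume]
  | cons c rest ih =>
    intro d hd
    simp only [ukldalneConsume]
    by_cases h0 : d.getD c 0 = 0
    · have : ¬ (∀ x ∈ c :: rest, ((c :: rest).count x : Int) ≤ d.getD x 0) := by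
        intro hall
        have := hall c (by simp)
        rw [h0] at this
        have hc : 0 < (c :: rest).count c := List.count_pos_iff.mpr (by simp)
        omega
      simp only [h0, if_true, decide_eq_false this, beq_self_eq_true]
    · have hn : (0 : Int) < d.getD c 0 := lt_of_le_of_ne (hd c) (Ne.symm h0)
      have hnz : (d.getD c 0 == 0) = false := by simpa using h0
      simp only [hnz, Bool.false_eq_true, if_false]
      have hpos : ∀ x, 0 ≤ (d.insert c (d.getD c 0 - 1)).getD x 0 := by
        intro x
        rw [PySem.Dict.getD_insert]
        split_ifs
        · omega
        · exact hd x
      rw [ih _ hpos, decide_eq_decide]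
      constructor
      · intro hall x hx
        rcases List.mem_cons.mp hx with hxc | hxr
        · subst hxc
          simp only [List.count_cons_self]
          by_cases hr : x ∈ rest
          · have := hall x hr
            rw [PySem.Dict.getD_insert, if_pos rfl] at this
            push_cast at this ⊢
            omega
          · rw [List.count_eq_zero_of_not_mem hr]
            push_cast
            omega
        · by_cases hxc : x = c
          · subst hxc
            simp only [List.count_cons_self]
            have := hall x hxr
            rw [PySem.Dict.getD_insert, if_pos rfl] at this
            push_cast at this ⊢
            omega
          · have := hall x hxr
            rw [PySem.Dict.getD_insert, if_neg hxc] at this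
            simpa [List.count_cons, Ne.symm hxc] using this
      · intro hall x hx
        rw [PySem.Dict.getD_insert]
        by_cases hxc : x = c
        · subst hxc
          have := hall x (by simp)
          simp only [List.count_cons_self] at this
          rw [if_pos rfl]
          push_cast at this ⊢
          omega
        · have := hall x (by simp [hx])
          rw [if_neg hxc]
          simpa [List.count_cons, Ne.symm hxc] using this

-- ===== VERDICT (by name: the statement is the Claim_ definition above) =====
theorem ukldalne_spec : Claim_equal_ukldalne := by
  intro w1 w2 _
  unfold Spec_ukldalne ukldalne ukldalne_alt
  simp only [litery_eq_counter, PySem.Dict.foldl_insert_getD_add_one_eq_counter]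
  rw [loopA_eq_all, consume_eq _ _ (by
    intro c
    rw [PySem.Dict.getD_counter]
    positivity)]
  rw [Bool.eq_iff_iff]
  simp only [List.all_eq_true, Bool.and_eq_true, decide_eq_true_eq,
    PySem.Dict.keys_counter, PySem.Dict.getD_counter, PySem.Dict.contains_counter,
    PySem.Set.mem_ofList]
  constructor
  · intro h c hc
    exact (h c hc).2
  · intro h e he
    have hle := h e he
    have h1 : 0 < (w1.toList.count e : Int) := by
      have := List.count_pos_iff.mpr he
      omega
    have hm : e ∈ w2.toList := List.count_pos_iff.mp (by omega)
    exact ⟨by simpa using hm, hle⟩
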